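-- pv_equiv track=rewrite | github.com/734ai/MicroGolf | scripts/comprehensive_sequence_optimizer.py | are_functionally_similar
-- ===== SOURCE A (Python) =====
-- def are_functionally_similar(prim1: str, prim2: str) -> bool:
--     """Check if two primitives are functionally similar."""
--     similarity_groups = [
--         {'r90', 'r180', 'r270'},  # Rotations
--         {'fh', 'fv'},             # Flips
--         {'mc', 'tm', 'rc'},       # Color operations
--         {'ff', 'bb', 'ext'},      # Fill operations
--         {'cc', 'sv', 'ct'},       # Component analysis
--         {'inc', 'avg', 'sm'}      # Numeric operations
--     ]
--
--     for group in similarity_groups: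
--         if prim1 in group and prim2 in group:
--             return True
--     return False
-- ===== SOURCE B (Python) =====
-- _GROUPS = [
--     ('r90', 'r180', 'r270'),  # Rotations
--     ('fh', 'fv'),             # Flips
--     ('mc', 'tm', 'rc'),       # Color operations
--     ('ff', 'bb', 'ext'),      # Fill operations
--     ('cc', 'sv', 'ct'),       # Component analysis
--     ('inc', 'avg', 'sm'),     # Numeric operations
-- ]
-- _GROUP_ID = {p: i for i, g in enumerate(_GROUPS) for p in g}
--
--
-- def are_functionally_similar(prim1: str, prim2: str) -> bool:
--     """Check if two primitives are functionally similar."""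
--     return prim1 in _GROUP_ID and _GROUP_ID.get(prim1) == _GROUP_ID.get(prim2)
-- ===== Notes on version B (the rewrite author's own statement) =====
-- stated objective: idiomatic
-- what changed: Replaces the per-call loop over six sets testing both primitives' membership with a module-level dict comprehension mapping each primitive to its group id, built once; the function body becomes a single membership guard plus a comparison of two dict lookups.
import Mathlib
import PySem

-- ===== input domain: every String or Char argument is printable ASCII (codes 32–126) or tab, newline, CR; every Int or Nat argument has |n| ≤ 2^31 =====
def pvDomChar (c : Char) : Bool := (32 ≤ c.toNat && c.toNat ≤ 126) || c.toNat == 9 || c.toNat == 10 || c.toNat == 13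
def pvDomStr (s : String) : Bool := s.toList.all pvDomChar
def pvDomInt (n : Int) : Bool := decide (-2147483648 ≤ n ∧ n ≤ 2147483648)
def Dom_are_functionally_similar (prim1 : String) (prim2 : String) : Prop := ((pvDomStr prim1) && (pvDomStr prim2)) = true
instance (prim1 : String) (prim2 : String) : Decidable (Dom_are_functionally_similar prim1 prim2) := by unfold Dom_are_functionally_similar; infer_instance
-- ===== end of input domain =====

-- B replaces A's per-call loop over six similarity sets by a flat primitive→group-id
-- dict built once, then one membership guard and two lookups (objective: idiomatic).

-- ===== PORT A =====
def pvSimGroups : List (PySem.Set String) :=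
  [PySem.Set.ofList ["r90", "r180", "r270"],
   PySem.Set.ofList ["fh", "fv"],
   PySem.Set.ofList ["mc", "tm", "rc"],
   PySem.Set.ofList ["ff", "bb", "ext"],
   PySem.Set.ofList ["cc", "sv", "ct"],
   PySem.Set.ofList ["inc", "avg", "sm"]]

-- the 'for group in similarity_groups: if prim1 in group and prim2 in group: return True' loop
def pvSimLoop (groups : List (PySem.Set String)) (prim1 prim2 : String) : Bool :=
  match groups with
  | [] => false
  | g :: rest =>
      if PySem.Set.contains g prim1 && PySem.Set.contains g prim2 then true
      else pvSimLoop rest prim1 prim2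

def are_functionally_similar (prim1 : String) (prim2 : String) : Bool :=
  pvSimLoop pvSimGroups prim1 prim2

-- ===== PORT B =====
def pvGroupsB : List (List String) :=
  [["r90", "r180", "r270"],
   ["fh", "fv"],
   ["mc", "tm", "rc"],
   ["ff", "bb", "ext"],
   ["cc", "sv", "ct"],
   ["inc", "avg", "sm"]]

-- _GROUP_ID = {p: i for i, g in enumerate(_GROUPS) for p in g}
def pvGroupId : PySem.Dict String Int :=
  (PySem.List.enumerate pvGroupsB).foldl
    (fun d ig => ig.2.foldl (fun d p => d.insert p ig.1) d) PySem.Dict.empty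

def are_functionally_similar_alt (prim1 : String) (prim2 : String) : Bool :=
  pvGroupId.contains prim1 && (pvGroupId.get? prim1 == pvGroupId.get? prim2)

-- ===== PRECONDITION & SPEC =====
def Spec_are_functionally_similar (prim1 : String) (prim2 : String) (out : Bool) : Prop := out = are_functionally_similar_alt prim1 prim2
instance (prim1 : String) (prim2 : String) (out : Bool) : Decidable (Spec_are_functionally_similar prim1 prim2 out) := by unfold Spec_are_functionally_similar; infer_instance

-- ===== CLAIM (what is proved, stated in full; the proofs are below) =====
def Claim_equal_are_functionally_similar : Prop := ∀ (prim1 : String) (prim2 : String), Dom_are_functionally_similar prim1 prim2 → Spec_are_functionally_similar prim1 prim2 (are_functionally_similar prim1 prim2)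

-- ===== LEMMAS AND PROOFS =====

-- the 17 primitives that occur in any group
def pvKeys : List String := ["r90","r180","r270","fh","fv","mc","tm","rc","ff","bb","ext","cc","sv","ct","inc","avg","sm"]

-- B's comprehension-built dict, evaluated to its literal association list
def pvIdLit : PySem.Dict String Int := PySem.Dict.mk
  [("r90",0),("r180",0),("r270",0),("fh",1),("fv",1),("mc",2),("tm",2),("rc",2),
   ("ff",3),("bb",3),("ext",3),("cc",4),("sv",4),("ct",4),("inc",5),("avg",5),("sm",5)]

theorem pvGroupId_eq : pvGroupId = pvIdLit := by decide

theorem pv_key_key : ∀ p1 ∈ pvKeys, ∀ p2 ∈ pvKeys,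
    are_functionally_similar p1 p2 = are_functionally_similar_alt p1 p2 := by decide

theorem pvA_false_left (p1 p2 : String) (h : p1 ∉ pvKeys) :
    are_functionally_similar p1 p2 = false := by
  simp only [pvKeys, List.mem_cons, List.not_mem_nil, or_false, not_or] at h
  obtain ⟨h1,h2,h3,h4,h5,h6,h7,h8,h9,h10,h11,h12,h13,h14,h15,h16,h17⟩ := h
  simp [are_functionally_similar, pvSimGroups, pvSimLoop, PySem.Set.contains, PySem.Set.ofList,
    PySem.Set.add, PySem.Set.empty,
    h1,h2,h3,h4,h5,h6,h7,h8,h9,h10,h11,h12,h13,h14,h15,h16,h17]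

theorem pvA_false_right (p1 p2 : String) (h : p2 ∉ pvKeys) :
    are_functionally_similar p1 p2 = false := by
  simp only [pvKeys, List.mem_cons, List.not_mem_nil, or_false, not_or] at h
  obtain ⟨h1,h2,h3,h4,h5,h6,h7,h8,h9,h10,h11,h12,h13,h14,h15,h16,h17⟩ := h
  simp [are_functionally_similar, pvSimGroups, pvSimLoop, PySem.Set.contains, PySem.Set.ofList,
    PySem.Set.add, PySem.Set.empty,
    h1,h2,h3,h4,h5,h6,h7,h8,h9,h10,h11,h12,h13,h14,h15,h16,h17]

theorem pvGet_none (p : String) (h : p ∉ pvKeys) : pvGroupId.get? p = none := by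
  simp only [pvKeys, List.mem_cons, List.not_mem_nil, or_false, not_or] at h
  obtain ⟨h1,h2,h3,h4,h5,h6,h7,h8,h9,h10,h11,h12,h13,h14,h15,h16,h17⟩ := h
  simp [pvGroupId_eq, pvIdLit, PySem.Dict.get?,
    Ne.symm h1, Ne.symm h2, Ne.symm h3, Ne.symm h4, Ne.symm h5, Ne.symm h6, Ne.symm h7, Ne.symm h8,
    Ne.symm h9, Ne.symm h10, Ne.symm h11, Ne.symm h12, Ne.symm h13, Ne.symm h14, Ne.symm h15,
    Ne.symm h16, Ne.symm h17]

theorem pvContains_false (p : String) (h : p ∉ pvKeys) : pvGroupId.contains p = false := by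
  simp only [pvKeys, List.mem_cons, List.not_mem_nil, or_false, not_or] at h
  obtain ⟨h1,h2,h3,h4,h5,h6,h7,h8,h9,h10,h11,h12,h13,h14,h15,h16,h17⟩ := h
  simp [pvGroupId_eq, pvIdLit, PySem.Dict.contains,
    Ne.symm h1, Ne.symm h2, Ne.symm h3, Ne.symm h4, Ne.symm h5, Ne.symm h6, Ne.symm h7, Ne.symm h8,
    Ne.symm h9, Ne.symm h10, Ne.symm h11, Ne.symm h12, Ne.symm h13, Ne.symm h14, Ne.symm h15,
    Ne.symm h16, Ne.symm h17]

theorem pvAlt_false_left (p1 p2 : String) (h : p1 ∉ pvKeys) :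
    are_functionally_similar_alt p1 p2 = false := by
  simp [are_functionally_similar_alt, pvContains_false p1 h]

theorem pvAlt_false_of_key (p1 p2 : String) (h1 : p1 ∈ pvKeys) (hn : pvGroupId.get? p2 = none) :
    are_functionally_similar_alt p1 p2 = false := by
  fin_cases h1 <;> simp only [are_functionally_similar_alt, hn] <;> decide

-- ===== VERDICT (by name: the statement is the Claim_ definition above) =====
theorem are_functionally_similar_spec : Claim_equal_are_functionally_similar := by
  intro p1 p2 _
  unfold Spec_are_functionally_similar
  by_cases h1 : p1 ∈ pvKeys
  · by_cases h2 : p2 ∈ pvKeys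
    · exact pv_key_key p1 h1 p2 h2
    · rw [pvA_false_right p1 p2 h2, pvAlt_false_of_key p1 p2 h1 (pvGet_none p2 h2)]
  · rw [pvA_false_left p1 p2 h1, pvAlt_false_left p1 p2 h1]
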